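-- pv_equiv track=rewrite | github.com/Artem-Efremov/CodeWars | Arrays/Find, count/6kyu_Fruit Machine.py | fruit
-- ===== SOURCE A (Python) =====
-- def fruit(reels, spins):
--
--     # 1. Initialization
--     scoring = {'Wild': 10, 'Star': 9, 'Bell': 8, 'Shell': 7, 'Seven': 6,
--                'Cherry': 5, 'Bar': 4, 'King': 3, 'Queen': 2, 'Jack': 1}
--
--     received_items = {}
--     for i in range(3):
--         item = reels[i][spins[i]]
--         if item not in received_items:
--             received_items[item] = 1
--         else:
--             received_items[item] += 1
--
--     dif_items = len(received_items)
--
--     if dif_items == 3: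
--         score = 0
--     elif dif_items == 1:
--         triple = list(received_items)[0]
--         score = scoring[triple] * 10
--     else:
--         for i in received_items:
--             if received_items[i] == 2:
--                 double = i
--         if 'Wild' in received_items and double != 'Wild':
--             score = scoring[double] * 2
--         else:
--             score = scoring[double]
--
--
--     return score
-- ===== SOURCE B (Python) =====
-- def fruit(reels, spins):
--     scoring = {'Wild': 10, 'Star': 9, 'Bell': 8, 'Shell': 7, 'Seven': 6,
--                'Cherry': 5, 'Bar': 4, 'King': 3, 'Queen': 2, 'Jack': 1}
--     s0, s1, s2 = reels[0][spins[0]], reels[1][spins[1]], reels[2][spins[2]]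
--     if s0 == s1 == s2:
--         return scoring[s0] * 10
--     if s0 == s1:
--         pair, lone = s0, s2
--     elif s0 == s2:
--         pair, lone = s0, s1
--     elif s1 == s2:
--         pair, lone = s1, s0
--     else:
--         return 0
--     if lone == 'Wild' and pair != 'Wild':
--         return scoring[pair] * 2
--     return scoring[pair]
-- ===== Notes on version B (the rewrite author's own statement) =====
-- stated objective: simpler
-- what changed: B drops A's counting dict and len-based branching entirely: it unpacks the three spun symbols and branches directly on their pairwise equalities to find the triple/pair/lone symbol.
import Mathlib
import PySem

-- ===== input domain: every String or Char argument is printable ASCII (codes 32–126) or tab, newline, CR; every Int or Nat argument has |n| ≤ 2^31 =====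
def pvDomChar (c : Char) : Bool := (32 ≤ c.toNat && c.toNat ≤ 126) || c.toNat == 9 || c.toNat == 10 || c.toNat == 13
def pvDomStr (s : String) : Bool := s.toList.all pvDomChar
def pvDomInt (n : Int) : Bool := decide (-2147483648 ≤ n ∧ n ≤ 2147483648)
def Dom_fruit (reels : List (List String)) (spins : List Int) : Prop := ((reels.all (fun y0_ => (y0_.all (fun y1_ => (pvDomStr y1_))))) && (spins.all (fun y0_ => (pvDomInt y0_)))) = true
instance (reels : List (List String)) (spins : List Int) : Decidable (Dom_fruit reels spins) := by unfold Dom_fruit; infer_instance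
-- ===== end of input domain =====

-- B drops A's counting dict and len-based branching: it unpacks the three symbols and
-- branches directly on their pairwise equalities. Equivalence of the return values is proved on Pre_.

-- ===== PORT A =====
def fruitScoring : PySem.Dict String Int :=
  PySem.Dict.ofList [("Wild", 10), ("Star", 9), ("Bell", 8), ("Shell", 7), ("Seven", 6),
                     ("Cherry", 5), ("Bar", 4), ("King", 3), ("Queen", 2), ("Jack", 1)]

-- reels[i][spins[i]]  (none = IndexError, excluded by Pre_)
def fruitItem? (reels : List (List String)) (spins : List Int) (i : Int) : Option String :=
  (PySem.List.pyGet? reels i).bind fun reel =>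
    (PySem.List.pyGet? spins i).bind fun s => PySem.List.pyGet? reel s

def fruit (reels : List (List String)) (spins : List Int) : Int :=
  let received := (PySem.List.pyRange 0 3 1).foldl
    (fun d i =>
      match fruitItem? reels spins i with
      | some item => if d.contains item then d.modify item 0 (· + 1) else d.insert item 1
      | none => d)  -- Python raises here; Pre_ excludes it
    PySem.Dict.empty
  let difItems := received.size
  if difItems = 3 then 0
  else if difItems = 1 then
    match received.keys with
    | triple :: _ => fruitScoring.getD triple 0 * 10
    | [] => 0  -- unreachable: size = 1
  else
    -- last key with count 2 (the loop overwrites `double`)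
    let dbl := received.items.foldl (fun acc kv => if kv.2 = 2 then some kv.1 else acc) none
    match dbl with
    | some double =>
      if received.contains "Wild" && !(double == "Wild") then fruitScoring.getD double 0 * 2
      else fruitScoring.getD double 0
    | none => 0  -- unreachable: with 2 distinct keys some count is 2 (Python would raise NameError)

-- ===== PORT B =====
def altScoring : PySem.Dict String Int :=
  PySem.Dict.ofList [("Wild", 10), ("Star", 9), ("Bell", 8), ("Shell", 7), ("Seven", 6),
                     ("Cherry", 5), ("Bar", 4), ("King", 3), ("Queen", 2), ("Jack", 1)]

def altItem? (reels : List (List String)) (spins : List Int) (i : Int) : Option String :=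
  (PySem.List.pyGet? reels i).bind fun reel =>
    (PySem.List.pyGet? spins i).bind fun s => PySem.List.pyGet? reel s

def fruit_alt (reels : List (List String)) (spins : List Int) : Int :=
  match altItem? reels spins 0, altItem? reels spins 1, altItem? reels spins 2 with
  | some s0, some s1, some s2 =>
    if s0 = s1 ∧ s1 = s2 then altScoring.getD s0 0 * 10
    else
      let pl : Option (String × String) :=
        if s0 = s1 then some (s0, s2)
        else if s0 = s2 then some (s0, s1)
        else if s1 = s2 then some (s1, s0)
        else none
      match pl with
      | none => 0
      | some (pair, lone) =>
        if lone = "Wild" ∧ pair ≠ "Wild" then altScoring.getD pair 0 * 2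
        else altScoring.getD pair 0
  | _, _, _ => 0  -- Python raises IndexError here; Pre_ excludes it

-- ===== PRECONDITION & SPEC =====
-- Pre_: the three lookups reels[i][spins[i]] are in range (else Python raises IndexError) and,
-- when some two of the three symbols are equal, the repeated symbol is a scoring key
-- (else Python A raises KeyError looking up its score; all-distinct spins never touch scoring).
def Pre_fruit (reels : List (List String)) (spins : List Int) : Prop :=
  ((((PySem.List.pyGet? reels 0).bind fun reel =>
       (PySem.List.pyGet? spins 0).bind fun s => PySem.List.pyGet? reel s).bind fun s0 =>
    (((PySem.List.pyGet? reels 1).bind fun reel =>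
       (PySem.List.pyGet? spins 1).bind fun s => PySem.List.pyGet? reel s).bind fun s1 =>
     (((PySem.List.pyGet? reels 2).bind fun reel =>
       (PySem.List.pyGet? spins 2).bind fun s => PySem.List.pyGet? reel s).map fun s2 =>
      if s0 = s1 ∨ s0 = s2 then decide (s0 ∈ (["Wild", "Star", "Bell", "Shell", "Seven",
                                   "Cherry", "Bar", "King", "Queen", "Jack"] : List String))
      else if s1 = s2 then decide (s1 ∈ (["Wild", "Star", "Bell", "Shell", "Seven",
                                   "Cherry", "Bar", "King", "Queen", "Jack"] : List String))
      else true)))).getD false = true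
instance (reels : List (List String)) (spins : List Int) : Decidable (Pre_fruit reels spins) := by
  unfold Pre_fruit; infer_instance

def pvWitness_fruit : List (List String) × List Int :=
  ([["Wild", "Star"], ["Bell"], ["Star", "Cherry"]], [1, 0, -2])

def Spec_fruit (reels : List (List String)) (spins : List Int) (out : Int) : Prop := out = fruit_alt reels spins
instance (reels : List (List String)) (spins : List Int) (out : Int) : Decidable (Spec_fruit reels spins out) := by unfold Spec_fruit; infer_instance

-- ===== CLAIM (what is proved, stated in full; the proofs are below) =====
def Claim_equal_fruit : Prop := ∀ (reels : List (List String)) (spins : List Int), Dom_fruit reels spins → Pre_fruit reels spins → Spec_fruit reels spins (fruit reels spins)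

-- ===== LEMMAS AND PROOFS =====

lemma fruit_eq_core (reels : List (List String)) (spins : List Int) (s0 s1 s2 : String)
    (h0 : fruitItem? reels spins 0 = some s0)
    (h1 : fruitItem? reels spins 1 = some s1)
    (h2 : fruitItem? reels spins 2 = some s2) :
    fruit reels spins = fruit_alt reels spins := by
  have h0' : altItem? reels spins 0 = some s0 := h0
  have h1' : altItem? reels spins 1 = some s1 := h1
  have h2' : altItem? reels spins 2 = some s2 := h2
  have hr : PySem.List.pyRange 0 3 1 = [0, 1, 2] := by decide
  have hsc : altScoring = fruitScoring := rfl
  unfold fruit fruit_alt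
  rw [hr, h0', h1', h2', hsc]
  simp only [List.foldl, h0, h1, h2]
  by_cases h01 : s0 = s1 <;> by_cases h02 : s0 = s2 <;> by_cases h12 : s1 = s2 <;>
    subst_vars <;>
    simp_all [PySem.Dict.empty, PySem.Dict.insert, PySem.Dict.contains, PySem.Dict.modify,
      PySem.Dict.size, PySem.Dict.keys, PySem.Dict.getD, PySem.Dict.get?,
      List.foldl, beq_iff_eq] <;>
    split_ifs <;> tauto

-- ===== VERDICT (by name: the statement is the Claim_ definition above) =====
theorem fruit_spec : Claim_equal_fruit := by
  intro reels spins _ hpre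
  unfold Pre_fruit at hpre
  have hpre' : (((fruitItem? reels spins 0).bind fun s0 =>
      ((fruitItem? reels spins 1).bind fun s1 =>
       ((fruitItem? reels spins 2).map fun s2 =>
        if s0 = s1 ∨ s0 = s2 then decide (s0 ∈ (["Wild", "Star", "Bell", "Shell", "Seven",
                                     "Cherry", "Bar", "King", "Queen", "Jack"] : List String))
        else if s1 = s2 then decide (s1 ∈ (["Wild", "Star", "Bell", "Shell", "Seven",
                                     "Cherry", "Bar", "King", "Queen", "Jack"] : List String))
        else true)))).getD false = true := hpre
  cases h0 : fruitItem? reels spins 0 with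
  | none => rw [h0] at hpre'; simp at hpre'
  | some s0 =>
  cases h1 : fruitItem? reels spins 1 with
  | none => rw [h0, h1] at hpre'; simp at hpre'
  | some s1 =>
  cases h2 : fruitItem? reels spins 2 with
  | none => rw [h0, h1, h2] at hpre'; simp at hpre'
  | some s2 =>
  exact fruit_eq_core reels spins s0 s1 s2 h0 h1 h2
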